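-- pv_equiv track=rewrite | github.com/costa-group/grey | src/liveness/stack_layout_methods.py | max_tail_head_overlap
-- ===== SOURCE A (Python) =====
-- def max_tail_head_overlap(lst1, lst2, live):
--     """
--     Finds the max overlap between the head and the tail
--     """
--     n, m = len(lst1), len(lst2)
--     overlap_len = 0
--
--     # Start from the longest possible overlap and move forward
--     for i in range(1, min(n, m) + 1):
--         # We stop when we find a live variable
--         if lst2[i-1] in live:
--             break
--         if lst1[-i:] == lst2[:i]:  # Compare only once per step
--             overlap_len = i  # Update the max overlap found
--
--     return overlap_len
-- ===== SOURCE B (Python) =====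
-- def max_tail_head_overlap(lst1, lst2, live):
--     """Max overlap between tail of lst1 and head of lst2, cut off at the
--     first live variable in lst2; scans candidate lengths top-down and
--     returns the first (= maximal) match."""
--     n, m = len(lst1), len(lst2)
--     live_set = set(live)
--     k = 0
--     while k < min(n, m) and lst2[k] not in live_set:
--         k += 1
--     for i in range(k, 0, -1):
--         if lst1[n - i:] == lst2[:i]:
--             return i
--     return 0
-- ===== Notes on version B (the rewrite author's own statement) =====
-- stated objective: alternative
-- what changed: A interleaves the live-membership test and a slice comparison in one forward loop keeping the last match; B first computes the live cutoff index with a set, then scans candidate overlap lengths top-down and returns the first (maximal) match.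
import Mathlib
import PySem

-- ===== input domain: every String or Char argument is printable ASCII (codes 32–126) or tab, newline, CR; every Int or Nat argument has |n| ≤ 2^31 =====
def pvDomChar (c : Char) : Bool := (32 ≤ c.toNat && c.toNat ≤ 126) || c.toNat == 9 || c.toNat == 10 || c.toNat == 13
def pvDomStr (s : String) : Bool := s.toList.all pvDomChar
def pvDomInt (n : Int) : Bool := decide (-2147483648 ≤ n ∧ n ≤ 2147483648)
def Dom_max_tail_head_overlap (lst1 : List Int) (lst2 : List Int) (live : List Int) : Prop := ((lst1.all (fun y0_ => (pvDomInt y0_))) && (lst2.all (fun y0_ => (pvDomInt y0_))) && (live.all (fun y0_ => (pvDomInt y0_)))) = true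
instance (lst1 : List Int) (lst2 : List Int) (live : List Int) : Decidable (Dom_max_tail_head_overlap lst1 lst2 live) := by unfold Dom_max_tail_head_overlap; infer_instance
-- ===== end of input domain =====

-- B replaces A's single forward loop (membership test + slice compare, keeping the last match)
-- by two phases: first the live-cutoff index is found with a set, then candidate lengths are
-- scanned top-down, returning the first (= maximal) match. Objective: alternative decomposition.

-- ===== PORT A =====
-- A's for-loop with break, as recursion on i; lst2[i-1] is in range whenever tested (1 ≤ i ≤ min n m),
-- so List.getD is exact there.
def pvAGo (lst1 lst2 live : List Int) (stop : Nat) (i : Nat) (acc : Int) : Int :=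
  if _h : stop < i then acc
  else if lst2.getD (i - 1) 0 ∈ live then acc
  else pvAGo lst1 lst2 live stop (i + 1)
    (if PySem.List.slice lst1 (some (-(i : Int))) none
        = PySem.List.slice lst2 none (some (i : Int)) then (i : Int) else acc)
termination_by stop + 1 - i
decreasing_by omega

def max_tail_head_overlap (lst1 : List Int) (lst2 : List Int) (live : List Int) : Int :=
  pvAGo lst1 lst2 live (min lst1.length lst2.length) 1 0

-- ===== PORT B =====
-- Source B's while-loop finding the cutoff k (lst2[k] in range whenever tested, so getD is exact)
def pvBCut (lst2 : List Int) (liveSet : PySem.Set Int) (stop : Nat) (k : Nat) : Nat :=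
  if _h : k < stop then
    if lst2.getD k 0 ∈ liveSet then k else pvBCut lst2 liveSet stop (k + 1)
  else k
termination_by stop - k
decreasing_by omega

-- Source B's downward for-loop with early return; lst1[n-i:] with 0 ≤ n-i is List.drop, lst2[:i] is List.take
def pvBGo (lst1 lst2 : List Int) (n : Nat) : Nat → Int
  | 0 => 0
  | (i + 1) =>
      if lst1.drop (n - (i + 1)) = lst2.take (i + 1) then ((i + 1 : Nat) : Int)
      else pvBGo lst1 lst2 n i

def max_tail_head_overlap_alt (lst1 : List Int) (lst2 : List Int) (live : List Int) : Int :=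
  pvBGo lst1 lst2 lst1.length
    (pvBCut lst2 (PySem.Set.ofList live) (min lst1.length lst2.length) 0)

-- ===== PRECONDITION & SPEC =====
def Spec_max_tail_head_overlap (lst1 : List Int) (lst2 : List Int) (live : List Int) (out : Int) : Prop := out = max_tail_head_overlap_alt lst1 lst2 live
instance (lst1 : List Int) (lst2 : List Int) (live : List Int) (out : Int) : Decidable (Spec_max_tail_head_overlap lst1 lst2 live out) := by unfold Spec_max_tail_head_overlap; infer_instance

-- ===== CLAIM (what is proved, stated in full; the proofs are below) =====
def Claim_equal_max_tail_head_overlap : Prop := ∀ (lst1 : List Int) (lst2 : List Int) (live : List Int), Dom_max_tail_head_overlap lst1 lst2 live → Spec_max_tail_head_overlap lst1 lst2 live (max_tail_head_overlap lst1 lst2 live)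

-- ===== LEMMAS AND PROOFS =====

-- cutoff spec: pvBCut returns the first live index in [k, stop), or stop
theorem pvBCut_spec (lst2 live : List Int) (stop : Nat) :
    ∀ k, k ≤ stop →
      k ≤ pvBCut lst2 (PySem.Set.ofList live) stop k ∧
      pvBCut lst2 (PySem.Set.ofList live) stop k ≤ stop ∧
      (∀ j, k ≤ j → j < pvBCut lst2 (PySem.Set.ofList live) stop k → lst2.getD j 0 ∉ live) ∧
      (pvBCut lst2 (PySem.Set.ofList live) stop k < stop →
        lst2.getD (pvBCut lst2 (PySem.Set.ofList live) stop k) 0 ∈ live) := by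
  intro k hk
  induction' hn : stop - k with d ih generalizing k
  · rw [pvBCut, dif_neg (show ¬ k < stop by omega)]
    exact ⟨le_refl _, hk, fun j h1 h2 => absurd h2 (by omega), fun h => absurd h (by omega)⟩
  · have hlt : k < stop := by omega
    by_cases hm : lst2.getD k 0 ∈ PySem.Set.ofList live
    · rw [pvBCut, dif_pos hlt, if_pos hm]
      refine ⟨le_refl _, by omega, fun j h1 h2 => absurd h2 (by omega), fun _ => ?_⟩
      simpa [PySem.Set.mem_ofList] using hm
    · rw [pvBCut, dif_pos hlt, if_neg hm]
      have := ih (k + 1) (by omega) (by omega)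
      refine ⟨by omega, this.2.1, ?_, this.2.2.2⟩
      intro j h1 h2
      rcases Nat.eq_or_lt_of_le h1 with rfl | h1'
      · simpa [PySem.Set.mem_ofList] using hm
      · exact this.2.2.1 j (by omega) h2

-- the common scan: fold of "keep the last matching length" over lengths 1..K
def pvScan (lst1 lst2 : List Int) (K : Nat) (acc : Int) : Int :=
  (List.range' 1 K).foldl
    (fun a j => if lst1.drop (lst1.length - j) = lst2.take j then (j : Int) else a) acc

theorem pvScan_succ (lst1 lst2 : List Int) (K : Nat) (acc : Int) :
    pvScan lst1 lst2 (K + 1) acc =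
      if lst1.drop (lst1.length - (K + 1)) = lst2.take (K + 1) then ((K + 1 : Nat) : Int)
      else pvScan lst1 lst2 K acc := by
  unfold pvScan
  rw [List.range'_1_concat, List.foldl_append]
  simp [Nat.add_comm 1 K]

-- B's downward scan computes the same fold
theorem pvBGo_eq_scan (lst1 lst2 : List Int) : ∀ K,
    pvBGo lst1 lst2 lst1.length K = pvScan lst1 lst2 K 0 := by
  intro K
  induction K with
  | zero => simp [pvBGo, pvScan]
  | succ d ih =>
      rw [pvScan_succ, pvBGo]
      split_ifs with h <;> simp [ih]

-- A's forward loop computes the fold up to the cutoff K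
theorem pvAGo_eq_scan (lst1 lst2 live : List Int) (stop K : Nat)
    (hK : K ≤ stop)
    (hnl : ∀ j, j < K → lst2.getD j 0 ∉ live)
    (hbr : K < stop → lst2.getD K 0 ∈ live) :
    ∀ i acc, 1 ≤ i → i ≤ K + 1 →
      pvAGo lst1 lst2 live stop i acc =
        (List.range' i (K + 1 - i)).foldl
          (fun a j => if lst1.drop (lst1.length - j) = lst2.take j then (j : Int) else a) acc := by
  intro i acc h1 h2
  induction' hn : K + 1 - i with d ih generalizing i acc
  · -- i = K + 1: A breaks (lst2[K] is live) or the loop is already past stop (K = stop)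
    have hiK : i = K + 1 := by omega
    subst hiK
    rw [pvAGo]
    by_cases hs : stop < K + 1
    · rw [dif_pos hs]
      simp
    · have hKs : K < stop := by omega
      rw [dif_neg hs]
      have : K + 1 - 1 = K := by omega
      rw [this, if_pos (hbr hKs)]
      simp
  · -- i ≤ K: lst2[i-1] is not live, execute the body and recurse
    have hiK : i ≤ K := by omega
    rw [pvAGo]
    have hs : ¬ stop < i := by omega
    have hnl' : lst2.getD (i - 1) 0 ∉ live := hnl (i - 1) (by omega)
    rw [dif_neg hs, if_neg hnl']
    have hslice1 := PySem.List.slice_from_neg_natCast lst1 i (show 0 < i by omega)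
    have hslice2 := PySem.List.slice_to_natCast lst2 i
    rw [hslice1, hslice2]
    rw [ih (i + 1) _ (by omega) (by omega) (by omega)]
    have hr : List.range' i (d + 1) = i :: List.range' (i + 1) d := List.range'_succ ..
    rw [hr, List.foldl_cons]

-- ===== VERDICT (by name: the statement is the Claim_ definition above) =====
theorem max_tail_head_overlap_spec : Claim_equal_max_tail_head_overlap := by
  intro lst1 lst2 live _
  unfold Spec_max_tail_head_overlap max_tail_head_overlap max_tail_head_overlap_alt
  set stop := min lst1.length lst2.length with hstopdef
  obtain ⟨h0, hle, hnl, hbr⟩ := pvBCut_spec lst2 live stop 0 (Nat.zero_le _)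
  set K := pvBCut lst2 (PySem.Set.ofList live) stop 0 with hKdef
  rw [pvAGo_eq_scan lst1 lst2 live stop K hle (fun j hj => hnl j (Nat.zero_le _) hj) hbr
        1 0 (le_refl _) (by omega)]
  rw [pvBGo_eq_scan]
  simp [pvScan]
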